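-- pv_equiv track=rewrite | github.com/Jingood/Coding-test | 백준/Silver/10844. 쉬운 계단 수/쉬운 계단 수.py | count_stair_numbers
-- ===== SOURCE A (Python) =====
-- def count_stair_numbers(n):
--     MOD = 1_000_000_000
--
--     dp_cur = [0] * 10
--     for d in range(1, 10):
--         dp_cur[d] = 1
--
--     for length in range(2, n + 1):
--         dp_nxt = [0] * 10
--         dp_nxt[0] = dp_cur[1]
--
--         for d in range(1, 9):
--             dp_nxt[d] = (dp_cur[d - 1] + dp_cur[d + 1]) % MOD
--         dp_nxt[9] = dp_cur[8]
--
--         dp_cur = dp_nxt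
--
--     return sum(dp_cur) % MOD
-- ===== SOURCE B (Python) =====
-- def count_stair_numbers(n):
--     MOD = 1_000_000_000
--
--     def dot(r, v):
--         s = 0
--         for a, b in zip(r, v):
--             s += a * b
--         return s
--
--     def vecmat(r, B):
--         acc = [0] * 10
--         for a, row in zip(r, B):
--             acc = [x + a * y for x, y in zip(acc, row)]
--         return acc
--
--     def mat_mul(A, B):
--         return [[x % MOD for x in vecmat(r, B)] for r in A]
--
--     def mat_vec(A, v):
--         return [dot(r, v) % MOD for r in A]
--
--     T = [
--         [0, 1, 0, 0, 0, 0, 0, 0, 0, 0],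
--         [1, 0, 1, 0, 0, 0, 0, 0, 0, 0],
--         [0, 1, 0, 1, 0, 0, 0, 0, 0, 0],
--         [0, 0, 1, 0, 1, 0, 0, 0, 0, 0],
--         [0, 0, 0, 1, 0, 1, 0, 0, 0, 0],
--         [0, 0, 0, 0, 1, 0, 1, 0, 0, 0],
--         [0, 0, 0, 0, 0, 1, 0, 1, 0, 0],
--         [0, 0, 0, 0, 0, 0, 1, 0, 1, 0],
--         [0, 0, 0, 0, 0, 0, 0, 1, 0, 1],
--         [0, 0, 0, 0, 0, 0, 0, 0, 1, 0],
--     ]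
--     R = [
--         [1, 0, 0, 0, 0, 0, 0, 0, 0, 0],
--         [0, 1, 0, 0, 0, 0, 0, 0, 0, 0],
--         [0, 0, 1, 0, 0, 0, 0, 0, 0, 0],
--         [0, 0, 0, 1, 0, 0, 0, 0, 0, 0],
--         [0, 0, 0, 0, 1, 0, 0, 0, 0, 0],
--         [0, 0, 0, 0, 0, 1, 0, 0, 0, 0],
--         [0, 0, 0, 0, 0, 0, 1, 0, 0, 0],
--         [0, 0, 0, 0, 0, 0, 0, 1, 0, 0],
--         [0, 0, 0, 0, 0, 0, 0, 0, 1, 0],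
--         [0, 0, 0, 0, 0, 0, 0, 0, 0, 1],
--     ]
--     v = [0, 1, 1, 1, 1, 1, 1, 1, 1, 1]
--
--     e = n - 1
--     A = T
--     while e > 0:
--         if e % 2 == 1:
--             R = mat_mul(R, A)
--         A = mat_mul(A, A)
--         e //= 2
--
--     return sum(mat_vec(R, v)) % MOD
-- ===== Notes on version B (the rewrite author's own statement) =====
-- stated objective: faster
-- what changed: Replaces the length-by-length ten-slot DP loop with binary exponentiation (repeated squaring) of the ten-by-ten stair transition matrix applied to the initial digit vector.
import Mathlib
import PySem

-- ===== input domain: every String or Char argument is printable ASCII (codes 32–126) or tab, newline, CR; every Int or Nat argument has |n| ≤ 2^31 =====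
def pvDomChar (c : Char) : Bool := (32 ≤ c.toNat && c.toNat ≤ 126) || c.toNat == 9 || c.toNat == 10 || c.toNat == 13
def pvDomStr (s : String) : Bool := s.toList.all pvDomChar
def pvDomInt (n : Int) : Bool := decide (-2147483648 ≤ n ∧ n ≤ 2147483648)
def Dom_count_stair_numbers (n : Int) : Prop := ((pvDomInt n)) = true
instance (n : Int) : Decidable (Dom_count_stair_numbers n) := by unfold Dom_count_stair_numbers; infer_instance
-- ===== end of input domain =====

-- B replaces A's length-by-length ten-slot DP loop by binary exponentiation of the
-- ten-by-ten stair transition matrix (measured asymptotically faster: O(log n) vs O(n)).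

-- ===== PORT A =====
-- one pass of A's inner loop body; list indices are literal and in range, so List.set/getD are exact
def csnStepA (MOD : Int) (dp_cur : List Int) : List Int :=
  let dp_nxt : List Int := List.replicate 10 0
  let dp_nxt := dp_nxt.set 0 (dp_cur.getD 1 0)
  let dp_nxt := (PySem.List.pyRange 1 9 1).foldl
      (fun acc d =>
        acc.set d.toNat (PySem.Int.mod (dp_cur.getD (d.toNat - 1) 0 + dp_cur.getD (d.toNat + 1) 0) MOD))
      dp_nxt
  dp_nxt.set 9 (dp_cur.getD 8 0)

def count_stair_numbers (n : Int) : Int :=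
  let MOD : Int := 1000000000
  let dp_cur : List Int :=
    (PySem.List.pyRange 1 10 1).foldl (fun dp d => dp.set d.toNat 1) (List.replicate 10 0)
  let dp_cur := (PySem.List.pyRange 2 (n + 1) 1).foldl (fun dp _ => csnStepA MOD dp) dp_cur
  PySem.Int.mod dp_cur.sum MOD

-- ===== PORT B =====
def csnDot (r v : List Int) : Int :=
  (r.zip v).foldl (fun s ab => s + ab.1 * ab.2) 0

def csnVecmat (r : List Int) (B : List (List Int)) : List Int :=
  (r.zip B).foldl (fun acc ar => List.zipWith (fun x y => x + ar.1 * y) acc ar.2)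
    (List.replicate 10 0)

def csnMatMul (MOD : Int) (A B : List (List Int)) : List (List Int) :=
  A.map (fun r => (csnVecmat r B).map (fun x => PySem.Int.mod x MOD))

def csnMatVec (MOD : Int) (A : List (List Int)) (v : List Int) : List Int :=
  A.map (fun r => PySem.Int.mod (csnDot r v) MOD)

def csnPowLoop (MOD : Int) (R A : List (List Int)) (e : Int) : List (List Int) :=
  if _h : 0 < e then
    csnPowLoop MOD (if PySem.Int.mod e 2 = 1 then csnMatMul MOD R A else R)
      (csnMatMul MOD A A) (PySem.Int.floordiv e 2)
  else R
termination_by e.toNat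
decreasing_by
  rw [PySem.Int.floordiv_eq_ediv_of_pos (by omega : (0:Int) < 2)]
  omega

def csnT : List (List Int) :=
  [[0, 1, 0, 0, 0, 0, 0, 0, 0, 0],
   [1, 0, 1, 0, 0, 0, 0, 0, 0, 0],
   [0, 1, 0, 1, 0, 0, 0, 0, 0, 0],
   [0, 0, 1, 0, 1, 0, 0, 0, 0, 0],
   [0, 0, 0, 1, 0, 1, 0, 0, 0, 0],
   [0, 0, 0, 0, 1, 0, 1, 0, 0, 0],
   [0, 0, 0, 0, 0, 1, 0, 1, 0, 0],
   [0, 0, 0, 0, 0, 0, 1, 0, 1, 0],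
   [0, 0, 0, 0, 0, 0, 0, 1, 0, 1],
   [0, 0, 0, 0, 0, 0, 0, 0, 1, 0]]

def csnId : List (List Int) :=
  [[1, 0, 0, 0, 0, 0, 0, 0, 0, 0],
   [0, 1, 0, 0, 0, 0, 0, 0, 0, 0],
   [0, 0, 1, 0, 0, 0, 0, 0, 0, 0],
   [0, 0, 0, 1, 0, 0, 0, 0, 0, 0],
   [0, 0, 0, 0, 1, 0, 0, 0, 0, 0],
   [0, 0, 0, 0, 0, 1, 0, 0, 0, 0],
   [0, 0, 0, 0, 0, 0, 1, 0, 0, 0],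
   [0, 0, 0, 0, 0, 0, 0, 1, 0, 0],
   [0, 0, 0, 0, 0, 0, 0, 0, 1, 0],
   [0, 0, 0, 0, 0, 0, 0, 0, 0, 1]]

def csnV : List Int := [0, 1, 1, 1, 1, 1, 1, 1, 1, 1]

def count_stair_numbers_alt (n : Int) : Int :=
  let MOD : Int := 1000000000
  let R := csnPowLoop MOD csnId csnT (n - 1)
  PySem.Int.mod (csnMatVec MOD R csnV).sum MOD

-- ===== PRECONDITION & SPEC =====
def Spec_count_stair_numbers (n : Int) (out : Int) : Prop := out = count_stair_numbers_alt n
instance (n : Int) (out : Int) : Decidable (Spec_count_stair_numbers n out) := by unfold Spec_count_stair_numbers; infer_instance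

-- ===== CLAIM (what is proved, stated in full; the proofs are below) =====
def Claim_equal_count_stair_numbers : Prop := ∀ (n : Int), Dom_count_stair_numbers n → Spec_count_stair_numbers n (count_stair_numbers n)

-- ===== LEMMAS AND PROOFS =====

-- symbolic dot product (sum of pointwise products), the value csnDot computes
def csnDS (r v : List Int) : Int := (List.zipWith (· * ·) r v).sum

theorem csnDS_nil (v : List Int) : csnDS [] v = 0 := by simp [csnDS]

theorem csnDS_nil_right (r : List Int) : csnDS r [] = 0 := by simp [csnDS]

theorem csnDS_cons (a b : Int) (r v : List Int) :
    csnDS (a :: r) (b :: v) = a * b + csnDS r v := by simp [csnDS]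

theorem csnDot_go (r : List Int) : ∀ (v : List Int) (s : Int),
    (r.zip v).foldl (fun s ab => s + ab.1 * ab.2) s = s + csnDS r v := by
  induction r with
  | nil => intro v s; simp [csnDS]
  | cons a r ih =>
    intro v s
    cases v with
    | nil => simp [csnDS]
    | cons b v => simp [ih, csnDS_cons]; ring

theorem csnDot_eq (r v : List Int) : csnDot r v = csnDS r v := by
  unfold csnDot; rw [csnDot_go]; ring

theorem csnDS_replicate_zero : ∀ (m : Nat) (v : List Int), csnDS (List.replicate m 0) v = 0 := by
  intro m
  induction m with
  | zero => intro v; simp [csnDS]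
  | succ m ih =>
    intro v
    cases v with
    | nil => simp [csnDS]
    | cons b v => simp [List.replicate, csnDS_cons, ih]

theorem csnDS_affine (a : Int) : ∀ (acc row v : List Int), acc.length = row.length →
    csnDS (List.zipWith (fun x y => x + a * y) acc row) v = csnDS acc v + a * csnDS row v := by
  intro acc
  induction acc with
  | nil =>
    intro row v h
    cases row with
    | nil => simp [csnDS]
    | cons y row => simp at h
  | cons x acc ih =>
    intro row v h
    cases row with
    | nil => simp at h
    | cons y row =>
      cases v with
      | nil => simp [csnDS]
      | cons c v =>
        simp only [List.zipWith_cons_cons, csnDS_cons]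
        rw [ih row v (by simpa using h)]
        ring

theorem csnVecmat_go (v : List Int) : ∀ (r : List Int) (B : List (List Int)) (acc : List Int),
    (∀ row ∈ B, row.length = acc.length) →
    csnDS ((r.zip B).foldl (fun acc ar => List.zipWith (fun x y => x + ar.1 * y) acc ar.2) acc) v
      = csnDS acc v + csnDS r (B.map (fun rB => csnDS rB v)) := by
  intro r
  induction r with
  | nil => intro B acc _; simp [csnDS_nil]
  | cons a r ih =>
    intro B acc h
    cases B with
    | nil => simp [csnDS_nil_right]
    | cons row B =>
      have hrow : row.length = acc.length := h row (by simp)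
      have h' : ∀ row' ∈ B, row'.length = (List.zipWith (fun x y => x + a * y) acc row).length := by
        intro row' hm
        rw [List.length_zipWith, hrow, Nat.min_self]
        exact h row' (by simp [hm])
      simp only [List.zip_cons_cons, List.foldl_cons]
      rw [ih B _ h', csnDS_affine a acc row v hrow.symm, List.map_cons, csnDS_cons]
      ring

theorem csnDS_vecmat (r : List Int) (B : List (List Int)) (v : List Int)
    (hB : ∀ row ∈ B, row.length = 10) :
    csnDS (csnVecmat r B) v = csnDS r (B.map (fun rB => csnDS rB v)) := by
  unfold csnVecmat
  rw [csnVecmat_go v r B (List.replicate 10 0) (by simpa using hB), csnDS_replicate_zero]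
  ring

theorem csnVecmat_length (r : List Int) (B : List (List Int))
    (hB : ∀ row ∈ B, row.length = 10) : (csnVecmat r B).length = 10 := by
  unfold csnVecmat
  have go : ∀ (l : List (Int × List Int)) (acc : List Int),
      (∀ p ∈ l, p.2.length = acc.length) →
      (l.foldl (fun acc ar => List.zipWith (fun x y => x + ar.1 * y) acc ar.2) acc).length
        = acc.length := by
    intro l
    induction l with
    | nil => intro acc _; simp
    | cons p l ih =>
      intro acc h
      have hp : p.2.length = acc.length := h p (by simp)
      have hlen : (List.zipWith (fun x y => x + p.1 * y) acc p.2).length = acc.length := by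
        rw [List.length_zipWith, hp, Nat.min_self]
      simp only [List.foldl_cons]
      rw [ih _ (by intro q hq; rw [hlen]; exact h q (by simp [hq])), hlen]
  rw [go (r.zip B) (List.replicate 10 0)
    (by intro p hp; simpa using hB p.2 (List.of_mem_zip hp).2)]
  simp

-- a % 10^9 rewritten from the Python primitive
theorem csn_pm (x : Int) : PySem.Int.mod x 1000000000 = x % 1000000000 :=
  PySem.Int.mod_eq_emod_of_pos (by norm_num)

theorem csnDS_map_mod_left : ∀ (xs v : List Int),
    Int.ModEq 1000000000 (csnDS (xs.map (fun x => x % 1000000000)) v) (csnDS xs v) := by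
  intro xs
  induction xs with
  | nil => intro v; simp [csnDS]
  | cons a xs ih =>
    intro v
    cases v with
    | nil => simp [csnDS_nil_right]
    | cons b v =>
      simp only [List.map_cons, csnDS_cons]
      exact (Int.ModEq.mul_right b (Int.emod_emod_of_dvd a dvd_rfl)).add (ih v)

theorem csnDS_map_mod_right : ∀ (r ws : List Int),
    Int.ModEq 1000000000 (csnDS r (ws.map (fun x => x % 1000000000))) (csnDS r ws) := by
  intro r
  induction r with
  | nil => intro ws; simp [csnDS_nil]
  | cons a r ih =>
    intro ws
    cases ws with
    | nil => simp [csnDS_nil_right]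
    | cons b ws =>
      simp only [List.map_cons, csnDS_cons]
      exact (Int.ModEq.mul_left a (Int.emod_emod_of_dvd b dvd_rfl)).add (ih ws)

-- matVec(matMul A B, v) = matVec(A, matVec(B, v)) mod 10^9
theorem csn_assoc (A B : List (List Int)) (v : List Int)
    (hB : ∀ row ∈ B, row.length = 10) :
    csnMatVec 1000000000 (csnMatMul 1000000000 A B) v
      = csnMatVec 1000000000 A (csnMatVec 1000000000 B v) := by
  unfold csnMatVec csnMatMul
  rw [List.map_map]
  apply List.map_congr_left
  intro r _
  simp only [Function.comp, csn_pm, csnDot_eq]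
  have h1 : Int.ModEq 1000000000
      (csnDS ((csnVecmat r B).map (fun x => x % 1000000000)) v)
      (csnDS r (B.map (fun rB => csnDS rB v))) := by
    have := csnDS_map_mod_left (csnVecmat r B) v
    rwa [csnDS_vecmat r B v hB] at this
  have h2 : Int.ModEq 1000000000
      (csnDS r (B.map (fun rB => csnDS rB v % 1000000000)))
      (csnDS r (B.map (fun rB => csnDS rB v))) := by
    have := csnDS_map_mod_right r (B.map (fun rB => csnDS rB v))
    rwa [List.map_map] at this
  exact h1.trans h2.symm

theorem csnMatMul_rows (A B : List (List Int)) (hB : ∀ row ∈ B, row.length = 10) :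
    ∀ row ∈ csnMatMul 1000000000 A B, row.length = 10 := by
  intro row hrow
  unfold csnMatMul at hrow
  obtain ⟨r, _, rfl⟩ := List.mem_map.mp hrow
  simpa using csnVecmat_length r B hB

-- iterate a vector map
def csnIter (f : List Int → List Int) : Nat → List Int → List Int
  | 0, v => v
  | k + 1, v => csnIter f k (f v)

theorem csnIter_outer (f : List Int → List Int) :
    ∀ (k : Nat) (v : List Int), f (csnIter f k v) = csnIter f (k + 1) v := by
  intro k
  induction k with
  | zero => intro v; rfl
  | succ k ih => intro v; exact ih (f v)

theorem csnIter_outer_matVec (A : List (List Int)) (k : Nat) (v : List Int) :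
    csnMatVec 1000000000 A (csnIter (fun w => csnMatVec 1000000000 A w) k v)
      = csnIter (fun w => csnMatVec 1000000000 A w) (k + 1) v :=
  csnIter_outer (fun w => csnMatVec 1000000000 A w) k v

theorem csn_foldl_const (f : List Int → List Int) :
    ∀ (l : List Int) (v : List Int), l.foldl (fun dp _ => f dp) v = csnIter f l.length v := by
  intro l
  induction l with
  | nil => intro v; rfl
  | cons a l ih => intro v; simpa [csnIter] using ih (f v)

theorem csnIter_double (A : List (List Int)) (hA : ∀ row ∈ A, row.length = 10) :
    ∀ (k : Nat) (v : List Int),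
      csnIter (fun w => csnMatVec 1000000000 (csnMatMul 1000000000 A A) w) k v
        = csnIter (fun w => csnMatVec 1000000000 A w) (2 * k) v := by
  intro k
  induction k with
  | zero => intro v; rfl
  | succ k ih =>
    intro v
    show csnIter _ k (csnMatVec 1000000000 (csnMatMul 1000000000 A A) v) = _
    rw [ih, csn_assoc A A v hA]
    have : 2 * (k + 1) = 2 * k + 1 + 1 := by omega
    rw [this]
    rfl

theorem csnPowLoop_eq (v : List Int) :
    ∀ (k : Nat) (e : Int), e.toNat = k → ∀ (R A : List (List Int)),
      (∀ row ∈ A, row.length = 10) →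
      csnMatVec 1000000000 (csnPowLoop 1000000000 R A e) v
        = csnMatVec 1000000000 R (csnIter (fun w => csnMatVec 1000000000 A w) e.toNat v) := by
  intro k
  induction k using Nat.strong_induction_on with
  | _ k ih =>
    intro e hk R A hA
    by_cases hpos : 0 < e
    · rw [csnPowLoop, dif_pos hpos]
      have hfd : PySem.Int.floordiv e 2 = e / 2 :=
        PySem.Int.floordiv_eq_ediv_of_pos (by omega)
      have hm2 : PySem.Int.mod e 2 = e % 2 :=
        PySem.Int.mod_eq_emod_of_pos (by omega)
      have hlt : (e / 2).toNat < k := by omega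
      have hAA : ∀ row ∈ csnMatMul 1000000000 A A, row.length = 10 :=
        csnMatMul_rows A A hA
      rw [hfd, hm2]
      rw [ih (e / 2).toNat hlt (e / 2) rfl _ _ hAA]
      rw [csnIter_double A hA]
      by_cases hodd : e % 2 = 1
      · rw [if_pos hodd]
        rw [csn_assoc R A _ hA]
        rw [csnIter_outer_matVec]
        have : 2 * (e / 2).toNat + 1 = e.toNat := by omega
        rw [this]
      · rw [if_neg hodd]
        have : 2 * (e / 2).toNat = e.toNat := by omega
        rw [this]
    · rw [csnPowLoop, dif_neg hpos]
      have : e.toNat = 0 := by omega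
      rw [this]
      rfl

-- the invariant: a DP state is a 10-list of reduced residues
def csnInv (w : List Int) : Prop := w.length = 10 ∧ ∀ x ∈ w, 0 ≤ x ∧ x < 1000000000

theorem csn_step_eq (dp : List Int) (h : csnInv dp) :
    csnStepA 1000000000 dp = csnMatVec 1000000000 csnT dp := by
  obtain ⟨hl, hb⟩ := h
  rcases dp with _ | ⟨a0, _ | ⟨a1, _ | ⟨a2, _ | ⟨a3, _ | ⟨a4, _ | ⟨a5, _ | ⟨a6, _ | ⟨a7, _ | ⟨a8, _ | ⟨a9, tl⟩⟩⟩⟩⟩⟩⟩⟩⟩⟩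
  all_goals simp only [List.length_cons, List.length_nil] at hl
  all_goals try omega
  obtain rfl : tl = [] := by
    have : tl.length = 0 := by omega
    exact List.eq_nil_of_length_eq_zero this
  simp only [List.mem_cons, List.not_mem_nil, or_false, forall_eq_or_imp, forall_eq] at hb
  have pr : PySem.List.pyRange 1 9 1 = [1, 2, 3, 4, 5, 6, 7, 8] := by decide
  simp only [csnStepA, csnMatVec, csnT, pr, csn_pm, List.foldl_cons, List.foldl_nil,
    List.map_cons, List.map_nil]
  simp only [show (2:Int).toNat = 2 from rfl, show (3:Int).toNat = 3 from rfl,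
    show (4:Int).toNat = 4 from rfl, show (5:Int).toNat = 5 from rfl,
    show (6:Int).toNat = 6 from rfl, show (7:Int).toNat = 7 from rfl,
    show (8:Int).toNat = 8 from rfl]
  norm_num [List.set, List.getD, List.replicate, csnDot]
  rw [Int.emod_eq_of_lt hb.2.1.1 hb.2.1.2,
      Int.emod_eq_of_lt hb.2.2.2.2.2.2.2.2.1.1 hb.2.2.2.2.2.2.2.2.1.2]
  exact ⟨rfl, rfl⟩

theorem csnMatVec_inv (A : List (List Int)) (v : List Int) (hA : A.length = 10) :
    csnInv (csnMatVec 1000000000 A v) := by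
  constructor
  · simp [csnMatVec, hA]
  · intro x hx
    unfold csnMatVec at hx
    obtain ⟨r, _, rfl⟩ := List.mem_map.mp hx
    rw [csn_pm]
    exact ⟨Int.emod_nonneg _ (by norm_num), Int.emod_lt_of_pos _ (by norm_num)⟩

theorem csn_step_inv (dp : List Int) (h : csnInv dp) :
    csnInv (csnStepA 1000000000 dp) := by
  rw [csn_step_eq dp h]
  exact csnMatVec_inv csnT dp (by decide)

theorem csn_matVecId (w : List Int) (h : csnInv w) :
    csnMatVec 1000000000 csnId w = w := by
  obtain ⟨hl, hb⟩ := h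
  rcases w with _ | ⟨a0, _ | ⟨a1, _ | ⟨a2, _ | ⟨a3, _ | ⟨a4, _ | ⟨a5, _ | ⟨a6, _ | ⟨a7, _ | ⟨a8, _ | ⟨a9, tl⟩⟩⟩⟩⟩⟩⟩⟩⟩⟩
  all_goals simp only [List.length_cons, List.length_nil] at hl
  all_goals try omega
  obtain rfl : tl = [] := by
    have : tl.length = 0 := by omega
    exact List.eq_nil_of_length_eq_zero this
  simp only [List.mem_cons, List.not_mem_nil, or_false, forall_eq_or_imp, forall_eq] at hb
  simp only [csnMatVec, csnId, csn_pm, List.map_cons, List.map_nil]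
  norm_num [csnDot]
  exact ⟨Int.emod_eq_of_lt hb.1.1 hb.1.2, Int.emod_eq_of_lt hb.2.1.1 hb.2.1.2,
    Int.emod_eq_of_lt hb.2.2.1.1 hb.2.2.1.2, Int.emod_eq_of_lt hb.2.2.2.1.1 hb.2.2.2.1.2,
    Int.emod_eq_of_lt hb.2.2.2.2.1.1 hb.2.2.2.2.1.2,
    Int.emod_eq_of_lt hb.2.2.2.2.2.1.1 hb.2.2.2.2.2.1.2,
    Int.emod_eq_of_lt hb.2.2.2.2.2.2.1.1 hb.2.2.2.2.2.2.1.2,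
    Int.emod_eq_of_lt hb.2.2.2.2.2.2.2.1.1 hb.2.2.2.2.2.2.2.1.2,
    Int.emod_eq_of_lt hb.2.2.2.2.2.2.2.2.1.1 hb.2.2.2.2.2.2.2.2.1.2,
    Int.emod_eq_of_lt hb.2.2.2.2.2.2.2.2.2.1 hb.2.2.2.2.2.2.2.2.2.2⟩

theorem csn_iter_eq : ∀ (k : Nat) (v : List Int), csnInv v →
    csnIter (fun w => csnMatVec 1000000000 csnT w) k v
      = csnIter (fun w => csnStepA 1000000000 w) k v
    ∧ csnInv (csnIter (fun w => csnStepA 1000000000 w) k v) := by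
  intro k
  induction k with
  | zero => intro v hv; exact ⟨rfl, hv⟩
  | succ k ih =>
    intro v hv
    have h1 := csn_step_eq v hv
    have h2 := csn_step_inv v hv
    have := ih (csnStepA 1000000000 v) h2
    exact ⟨by simpa [csnIter, h1] using this.1, this.2⟩

theorem csn_init_eq :
    (PySem.List.pyRange 1 10 1).foldl (fun dp d => dp.set d.toNat 1)
      (List.replicate 10 (0 : Int)) = csnV := by decide

theorem csnV_inv : csnInv csnV := by
  constructor
  · rfl
  · intro x hx
    simp [csnV] at hx
    rcases hx with rfl | rfl <;> norm_num

-- ===== VERDICT (by name: the statement is the Claim_ definition above) =====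
theorem count_stair_numbers_spec : Claim_equal_count_stair_numbers := by
  unfold Claim_equal_count_stair_numbers Spec_count_stair_numbers
  intro n _
  unfold count_stair_numbers count_stair_numbers_alt
  simp only []
  rw [csn_init_eq]
  rw [csn_foldl_const (fun dp => csnStepA 1000000000 dp)]
  rw [PySem.List.length_pyRange_one]
  have hT : ∀ row ∈ csnT, row.length = 10 := by decide
  rw [csnPowLoop_eq csnV (n - 1).toNat (n - 1) rfl csnId csnT hT]
  have hlen : (n + 1 - 2).toNat = (n - 1).toNat := by omega
  rw [hlen]
  obtain ⟨heq, hinv⟩ := csn_iter_eq (n - 1).toNat csnV csnV_inv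
  rw [heq, csn_matVecId _ hinv]
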